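-- pv_equiv track=rewrite | github.com/BekkerBarnabasCkik/Python | adventofcode/2.nap/feladat2.py | tombletrehozas
-- ===== SOURCE A (Python) =====
-- def tTulajdonsag(tomb, i):
--     return str(tomb[i])!="-" and str(tomb[i])!=","
--
-- def tombletrehozas(ertekek):
--     t=[]
--     ertek=""
--     for i in range(len(ertekek)):
--         if tTulajdonsag(ertekek, i):
--             ertek+=str(ertekek[i])
--         else:
--             t.append(str(ertek))
--             ertek=""
--     t.append(str(ertek))
--     return t
-- ===== SOURCE B (Python) =====
-- def tombletrehozas(ertekek):
--     # Build the token list back-to-front: walk the characters from the right,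
--     # starting a fresh empty token at each '-'/',' and prepending other
--     # characters onto the current first token.
--     t = [""]
--     for ch in reversed(ertekek):
--         if ch == "-" or ch == ",":
--             t.insert(0, "")
--         else:
--             t[0] = ch + t[0]
--     return t
-- ===== Notes on version B (the rewrite author's own statement) =====
-- stated objective: alternative
-- what changed: Replaces A's left-to-right index loop with a separate running-token accumulator (flushed at each delimiter) by a single right-to-left pass that builds the token list back-to-front, prepending each non-delimiter character onto the head token and inserting a fresh empty token at each delimiter.
import Mathlib
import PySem

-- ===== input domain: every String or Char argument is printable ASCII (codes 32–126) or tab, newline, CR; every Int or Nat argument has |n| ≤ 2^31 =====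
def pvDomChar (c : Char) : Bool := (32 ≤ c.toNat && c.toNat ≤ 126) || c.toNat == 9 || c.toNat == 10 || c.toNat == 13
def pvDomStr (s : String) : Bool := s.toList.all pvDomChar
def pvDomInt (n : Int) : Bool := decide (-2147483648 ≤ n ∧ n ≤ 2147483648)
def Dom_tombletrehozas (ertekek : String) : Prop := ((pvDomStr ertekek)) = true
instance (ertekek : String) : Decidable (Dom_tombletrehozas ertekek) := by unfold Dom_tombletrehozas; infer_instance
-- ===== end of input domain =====

-- B builds the token list back-to-front in one right-to-left pass instead of A's
-- left-to-right loop with a separate running-token accumulator (objective: alternative).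

-- ===== PORT A =====
-- str(tomb[i]) on a string yields the character at i; indices come from range(len),
-- so they are always in range and pyGetD's default ' ' is never used (exact there).
def tTulajdonsag (tomb : String) (i : Int) : Bool :=
  decide (PySem.List.pyGetD tomb.toList i ' ' ≠ '-') &&
  decide (PySem.List.pyGetD tomb.toList i ' ' ≠ ',')

def tombletrehozas (ertekek : String) : List String :=
  let r := (PySem.List.pyRange 0 (PySem.Str.len ertekek) 1).foldl
    (fun (st : List String × List Char) i =>
      if tTulajdonsag ertekek i then
        (st.1, st.2 ++ [PySem.List.pyGetD ertekek.toList i ' '])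
      else
        (st.1 ++ [String.ofList st.2], []))
    ([], [])
  r.1 ++ [String.ofList r.2]

-- ===== PORT B =====
def tombletrehozas_alt (ertekek : String) : List String :=
  ertekek.toList.reverse.foldl
    (fun (t : List String) ch =>
      if ch = '-' ∨ ch = ',' then
        "" :: t
      else
        match t with
        | [] => [String.ofList [ch]]   -- unreachable: t starts nonempty and stays nonempty
        | h :: rest => String.ofList (ch :: h.toList) :: rest)
    [""]

-- ===== PRECONDITION & SPEC =====
def Spec_tombletrehozas (ertekek : String) (out : List String) : Prop := out = tombletrehozas_alt ertekek
instance (ertekek : String) (out : List String) : Decidable (Spec_tombletrehozas ertekek out) := by unfold Spec_tombletrehozas; infer_instance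

-- ===== CLAIM (what is proved, stated in full; the proofs are below) =====
def Claim_equal_tombletrehozas : Prop := ∀ (ertekek : String), Dom_tombletrehozas ertekek → Spec_tombletrehozas ertekek (tombletrehozas ertekek)

-- ===== LEMMAS AND PROOFS =====

-- A's loop body, as a function of the character (proof-side names)
def pvStepA (st : List String × List Char) (c : Char) : List String × List Char :=
  if decide (c ≠ '-') && decide (c ≠ ',') then (st.1, st.2 ++ [c])
  else (st.1 ++ [String.ofList st.2], [])

-- B's loop body read as a foldr step (via List.foldl_reverse)
def pvStepB (c : Char) (t : List String) : List String :=
  if c = '-' ∨ c = ',' then "" :: t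
  else
    match t with
    | [] => [String.ofList [c]]
    | h :: rest => String.ofList (c :: h.toList) :: rest

def pvSplitB (cs : List Char) : List String := cs.foldr pvStepB [""]

-- prepend a pending character prefix onto the first token
def pvPre (e : List Char) : List String → List String
  | [] => [String.ofList e]
  | h :: rest => String.ofList (e ++ h.toList) :: rest

lemma pvSplitB_ne_nil (cs : List Char) : pvSplitB cs ≠ [] := by
  induction cs with
  | nil => simp [pvSplitB]
  | cons c cs ih =>
    simp only [pvSplitB, List.foldr_cons, pvStepB]
    split
    · simp
    · cases h : pvSplitB cs with
      | nil => exact absurd h ih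
      | cons a l => simp [pvSplitB] at h; simp [h]

lemma pvLoopA_eq (cs : List Char) : ∀ (t : List String) (e : List Char),
    (let r := cs.foldl pvStepA (t, e); r.1 ++ [String.ofList r.2])
      = t ++ pvPre e (pvSplitB cs) := by
  induction cs with
  | nil => intro t e; simp [pvSplitB, pvPre]
  | cons c cs ih =>
    intro t e
    by_cases hc : c = '-' ∨ c = ','
    · have hstep : pvStepA (t, e) c = (t ++ [String.ofList e], []) := by
        rcases hc with h | h <;> simp [pvStepA, h]
      have hB : pvSplitB (c :: cs) = "" :: pvSplitB cs := by
        rcases hc with h | h <;> simp [pvSplitB, pvStepB, h]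
      obtain ⟨a, l, hal⟩ : ∃ a l, pvSplitB cs = a :: l := by
        cases h : pvSplitB cs with
        | nil => exact absurd h (pvSplitB_ne_nil cs)
        | cons a l => exact ⟨a, l, rfl⟩
      simp only [List.foldl_cons, hstep, ih, hB, hal, pvPre, List.nil_append,
        String.ofList_toList, List.append_assoc]
      simp
    · rw [not_or] at hc
      have hstep : pvStepA (t, e) c = (t, e ++ [c]) := by
        simp [pvStepA, hc.1, hc.2]
      have hB : pvSplitB (c :: cs) = pvStepB c (pvSplitB cs) := rfl
      obtain ⟨a, l, hal⟩ : ∃ a l, pvSplitB cs = a :: l := by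
        cases h : pvSplitB cs with
        | nil => exact absurd h (pvSplitB_ne_nil cs)
        | cons a l => exact ⟨a, l, rfl⟩
      have hsB : pvStepB c (pvSplitB cs) = String.ofList (c :: a.toList) :: l := by
        simp [pvStepB, hal, hc.1, hc.2]
      simp only [List.foldl_cons, hstep, ih, hB, hal, pvPre]
      simp [pvStepB, hc.1, hc.2]

lemma pvA_eq_fold (ertekek : String) :
    tombletrehozas ertekek =
      (let r := ertekek.toList.foldl pvStepA ([], []);
        r.1 ++ [String.ofList r.2]) := by
  unfold tombletrehozas
  have h : (PySem.List.pyRange 0 (PySem.Str.len ertekek) 1).foldl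
      (fun (st : List String × List Char) i =>
        if tTulajdonsag ertekek i then
          (st.1, st.2 ++ [PySem.List.pyGetD ertekek.toList i ' '])
        else (st.1 ++ [String.ofList st.2], []))
      ([], [])
    = ertekek.toList.foldl pvStepA ([], []) := by
    rw [PySem.Str.len_eq]
    have := PySem.List.foldl_pyRange_zero_pyGetD' ertekek.toList ' ' pvStepA
      (([], []) : List String × List Char)
    rw [← this]
    have hf : (fun (st : List String × List Char) i =>
        if tTulajdonsag ertekek i then
          (st.1, st.2 ++ [PySem.List.pyGetD ertekek.toList i ' '])
        else (st.1 ++ [String.ofList st.2], []))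
      = fun (st : List String × List Char) i =>
          pvStepA st (PySem.List.pyGetD ertekek.toList i ' ') := by
      funext st i
      simp [tTulajdonsag, pvStepA]
    rw [hf]
  simp only [h]

lemma pvB_eq_split (ertekek : String) :
    tombletrehozas_alt ertekek = pvSplitB ertekek.toList := by
  unfold tombletrehozas_alt pvSplitB
  rw [List.foldl_reverse]
  rfl

-- ===== VERDICT (by name: the statement is the Claim_ definition above) =====
theorem tombletrehozas_spec : Claim_equal_tombletrehozas := by
  intro ertekek _
  unfold Spec_tombletrehozas
  rw [pvA_eq_fold, pvB_eq_split, pvLoopA_eq ertekek.toList [] []]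
  obtain ⟨a, l, hal⟩ : ∃ a l, pvSplitB ertekek.toList = a :: l := by
    cases h : pvSplitB ertekek.toList with
    | nil => exact absurd h (pvSplitB_ne_nil _)
    | cons a l => exact ⟨a, l, rfl⟩
  simp [hal, pvPre, String.ofList_toList]
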